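-- pv_equiv track=rewrite | github.com/oscarcastellas/aurum-solar-backend | backend/app/services/lead_scoring_service.py | _score_timeline_urgency
-- ===== SOURCE A (Python) =====
-- from typing import Dict, List, Optional, Any, Tuple
--
-- def _score_timeline_urgency(timeline: Optional[str]) -> int:
--     """Score based on installation timeline urgency"""
--
--     if not timeline:
--         return 50  # Neutral if not specified
--
--     timeline_lower = timeline.lower()
--
--     if any(phrase in timeline_lower for phrase in ["immediately", "asap", "urgent", "2025", "this year"]):
--         return 100  # High urgency
--     elif any(phrase in timeline_lower for phrase in ["soon", "next few months", "early 2026"]):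
--         return 80   # Medium-high urgency
--     elif any(phrase in timeline_lower for phrase in ["next year", "2026", "sometime soon"]):
--         return 60   # Medium urgency
--     elif any(phrase in timeline_lower for phrase in ["eventually", "maybe", "considering"]):
--         return 30   # Low urgency
--     else:
--         return 50   # Neutral
-- ===== SOURCE B (Python) =====
-- # Different strategy: a flat phrase->score map checked exhaustively with a running max
-- # accumulator (no tiered cascade, no early exit); correct because tier priority in A
-- # coincides with the maximum score among all matching phrases.
-- PHRASE_SCORES = {
--     "immediately": 100, "asap": 100, "urgent": 100, "2025": 100, "this year": 100,
--     "soon": 80, "next few months": 80, "early 2026": 80,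
--     "next year": 60, "2026": 60, "sometime soon": 60,
--     "eventually": 30, "maybe": 30, "considering": 30,
-- }
--
-- def _score_timeline_urgency(timeline):
--     if not timeline:
--         return 50
--     tl = timeline.lower()
--     best = None
--     for phrase, score in PHRASE_SCORES.items():
--         if phrase in tl and (best is None or score > best):
--             best = score
--     return 50 if best is None else best
-- ===== Notes on version B (the rewrite author's own statement) =====
-- stated objective: alternative
-- what changed: Replaces A's ordered four-tier elif cascade with a flat phrase-to-score dictionary scanned exhaustively while keeping a running maximum of the scores of all matching phrases (no tiers, no early exit); correct because tier priority equals the maximum matching score.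
import Mathlib
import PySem

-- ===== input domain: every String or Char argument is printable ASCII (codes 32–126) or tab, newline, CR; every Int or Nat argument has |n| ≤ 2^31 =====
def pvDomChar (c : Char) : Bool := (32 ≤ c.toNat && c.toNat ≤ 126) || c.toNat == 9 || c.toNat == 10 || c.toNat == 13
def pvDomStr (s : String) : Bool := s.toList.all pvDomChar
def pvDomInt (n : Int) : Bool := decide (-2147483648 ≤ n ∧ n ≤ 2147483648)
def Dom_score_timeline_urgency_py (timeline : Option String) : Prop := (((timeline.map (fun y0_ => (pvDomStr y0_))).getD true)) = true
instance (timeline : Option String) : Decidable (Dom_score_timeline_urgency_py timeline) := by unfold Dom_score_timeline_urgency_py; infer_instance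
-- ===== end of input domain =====

-- B drops A's tiered elif cascade: it checks a flat phrase->score map exhaustively and
-- keeps a running maximum over all matching phrases (objective: alternative, same cost).

-- ===== PORT A =====
def score_timeline_urgency_py (timeline : Option String) : Int :=
  match timeline with
  | none => 50
  | some t =>
    if t = "" then 50
    else
      let timeline_lower := PySem.Str.lower t
      if ["immediately", "asap", "urgent", "2025", "this year"].any
          (fun phrase => PySem.Str.isIn phrase timeline_lower) then 100
      else if ["soon", "next few months", "early 2026"].any
          (fun phrase => PySem.Str.isIn phrase timeline_lower) then 80
      else if ["next year", "2026", "sometime soon"].any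
          (fun phrase => PySem.Str.isIn phrase timeline_lower) then 60
      else if ["eventually", "maybe", "considering"].any
          (fun phrase => PySem.Str.isIn phrase timeline_lower) then 30
      else 50

-- ===== PORT B =====
-- PHRASE_SCORES of Source B (a dict with distinct literal keys, in insertion order)
def pvPhraseScores : List (String × Int) :=
  [ ("immediately", 100), ("asap", 100), ("urgent", 100), ("2025", 100), ("this year", 100),
    ("soon", 80), ("next few months", 80), ("early 2026", 80),
    ("next year", 60), ("2026", 60), ("sometime soon", 60),
    ("eventually", 30), ("maybe", 30), ("considering", 30) ]

-- body of Source B's loop: given (phrase-matched?, score) update the running best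
def pvStep (best : Option Int) (ms : Bool × Int) : Option Int :=
  if ms.1 && (match best with | none => true | some b => decide (ms.2 > b)) then some ms.2
  else best

def score_timeline_urgency_py_alt (timeline : Option String) : Int :=
  match timeline with
  | none => 50
  | some t =>
    if t = "" then 50
    else
      let tl := PySem.Str.lower t
      -- the running-max loop of Source B, then 'return 50 if best is None else best'
      let best := pvPhraseScores.foldl
        (fun best ps => pvStep best (PySem.Str.isIn ps.1 tl, ps.2)) none
      best.getD 50

-- ===== PRECONDITION & SPEC =====
def Spec_score_timeline_urgency_py (timeline : Option String) (out : Int) : Prop := out = score_timeline_urgency_py_alt timeline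
instance (timeline : Option String) (out : Int) : Decidable (Spec_score_timeline_urgency_py timeline out) := by unfold Spec_score_timeline_urgency_py; infer_instance

-- ===== CLAIM (what is proved, stated in full; the proofs are below) =====
def Claim_equal_score_timeline_urgency_py : Prop := ∀ (timeline : Option String), Dom_score_timeline_urgency_py timeline → Spec_score_timeline_urgency_py timeline (score_timeline_urgency_py timeline)

-- ===== LEMMAS AND PROOFS =====

-- the two programs agree as functions of the 14 substring tests (checked over all 2^14 cases)
theorem pv_bool_key : ∀ (b1 b2 b3 b4 b5 b6 b7 b8 b9 b10 b11 b12 b13 b14 : Bool),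
    (if (b1 || (b2 || (b3 || (b4 || b5)))) = true then (100 : Int)
     else if (b6 || (b7 || b8)) = true then 80
     else if (b9 || (b10 || b11)) = true then 60
     else if (b12 || (b13 || b14)) = true then 30
     else 50) =
    (([ (b1, (100 : Int)), (b2, 100), (b3, 100), (b4, 100), (b5, 100),
        (b6, 80), (b7, 80), (b8, 80),
        (b9, 60), (b10, 60), (b11, 60),
        (b12, 30), (b13, 30), (b14, 30) ].foldl pvStep none).getD 50) := by decide

-- ===== VERDICT (by name: the statement is the Claim_ definition above) =====
theorem score_timeline_urgency_py_spec : Claim_equal_score_timeline_urgency_py := by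
  intro timeline _
  unfold Spec_score_timeline_urgency_py
  cases timeline with
  | none => rfl
  | some t =>
    by_cases h : t = ""
    · simp [score_timeline_urgency_py, score_timeline_urgency_py_alt, h]
    · simp only [score_timeline_urgency_py, score_timeline_urgency_py_alt,
        List.any_cons, List.any_nil, Bool.or_false, if_neg h]
      rw [← List.foldl_map]
      simp only [pvPhraseScores, List.map_cons, List.map_nil]
      generalize PySem.Str.isIn "immediately" (PySem.Str.lower t) = b1
      generalize PySem.Str.isIn "asap" (PySem.Str.lower t) = b2
      generalize PySem.Str.isIn "urgent" (PySem.Str.lower t) = b3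
      generalize PySem.Str.isIn "2025" (PySem.Str.lower t) = b4
      generalize PySem.Str.isIn "this year" (PySem.Str.lower t) = b5
      generalize PySem.Str.isIn "soon" (PySem.Str.lower t) = b6
      generalize PySem.Str.isIn "next few months" (PySem.Str.lower t) = b7
      generalize PySem.Str.isIn "early 2026" (PySem.Str.lower t) = b8
      generalize PySem.Str.isIn "next year" (PySem.Str.lower t) = b9
      generalize PySem.Str.isIn "2026" (PySem.Str.lower t) = b10
      generalize PySem.Str.isIn "sometime soon" (PySem.Str.lower t) = b11
      generalize PySem.Str.isIn "eventually" (PySem.Str.lower t) = b12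
      generalize PySem.Str.isIn "maybe" (PySem.Str.lower t) = b13
      generalize PySem.Str.isIn "considering" (PySem.Str.lower t) = b14
      exact pv_bool_key b1 b2 b3 b4 b5 b6 b7 b8 b9 b10 b11 b12 b13 b14
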